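-- pv_equiv track=rewrite | github.com/apisec-inc/mcp-audit | mcp_audit/outputs/cyclonedx.py | _extract_version
-- ===== SOURCE A (Python) =====
-- def _extract_version(model_id: str) -> str:
--     """Extract version from model ID string."""
--     if not model_id:
--         return "unknown"
--
--     # Common patterns: gpt-4o-2024-08-06, claude-3-5-sonnet-20241022
--     parts = model_id.split("-")
--
--     # Look for date pattern (YYYYMMDD or YYYY-MM-DD)
--     for part in parts:
--         if len(part) == 8 and part.isdigit():
--             return f"{part[:4]}-{part[4:6]}-{part[6:]}"
--
--     # Look for version number pattern
--     for i, part in enumerate(parts):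
--         if part.replace(".", "").isdigit() and "." in part:
--             return part
--
--     return "latest"
-- ===== SOURCE B (Python) =====
-- def _extract_version(model_id: str) -> str:
--     """Extract version from model ID string (single pass over the parts)."""
--     if not model_id:
--         return "unknown"
--
--     candidate = None
--     for part in model_id.split("-"):
--         # a date part wins immediately, no matter what was seen before
--         if len(part) == 8 and part.isdigit():
--             return f"{part[:4]}-{part[4:6]}-{part[6:]}"
--         # remember the first dotted-version candidate
--         if candidate is None and part.replace(".", "").isdigit() and "." in part:
--             candidate = part
--
--     return candidate if candidate is not None else "latest"
-- ===== Notes on version B (the rewrite author's own statement) =====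
-- stated objective: alternative
-- what changed: Replaces A's two sequential scans over the parts (dates, then dotted versions) by a single loop that returns a date on sight while remembering the first dotted-version candidate for the fallthrough.
import Mathlib
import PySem

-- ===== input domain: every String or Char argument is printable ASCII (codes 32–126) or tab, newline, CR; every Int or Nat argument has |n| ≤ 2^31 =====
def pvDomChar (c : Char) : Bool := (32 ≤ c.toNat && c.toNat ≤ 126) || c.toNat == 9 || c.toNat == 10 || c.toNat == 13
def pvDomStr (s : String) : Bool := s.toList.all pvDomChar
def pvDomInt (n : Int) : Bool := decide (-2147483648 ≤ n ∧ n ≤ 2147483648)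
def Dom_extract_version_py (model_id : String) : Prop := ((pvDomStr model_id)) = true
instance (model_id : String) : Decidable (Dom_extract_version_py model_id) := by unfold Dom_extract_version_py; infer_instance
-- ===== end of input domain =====

-- B replaces A's two sequential scans over the parts by one loop carrying the first
-- dotted-version candidate; objective: alternative (same cost, single pass).

-- shared predicates/formatting: both Pythons use the exact same expressions
-- len(part) == 8 and part.isdigit()
def evIsDate (p : String) : Bool := PySem.Str.len p == 8 && PySem.Str.strIsdigit p
-- f"{part[:4]}-{part[4:6]}-{part[6:]}"
def evFmtDate (p : String) : String :=
  PySem.Str.join "-" [PySem.Str.slice p none (some 4),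
                      PySem.Str.slice p (some 4) (some 6),
                      PySem.Str.slice p (some 6) none]
-- part.replace(".", "").isdigit() and "." in part
def evIsVer (p : String) : Bool :=
  PySem.Str.strIsdigit (PySem.Str.replace p "." "") && PySem.Str.isIn "." p

-- ===== PORT A =====
-- first loop: date pattern
def evDateFind : List String → Option String
  | [] => none
  | p :: rest => if evIsDate p then some (evFmtDate p) else evDateFind rest

-- second loop: version pattern (the enumerate index i is unused in A)
def evVerFind : List String → Option String
  | [] => none
  | p :: rest => if evIsVer p then some p else evVerFind rest

def extract_version_py (model_id : String) : String :=
  if model_id = "" then "unknown"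
  else
    -- split? is none only for sep = ""; the literal "-" is nonempty
    let parts := (PySem.Str.split? model_id "-").getD []
    match evDateFind parts with
    | some r => r
    | none =>
      match evVerFind parts with
      | some r => r
      | none => "latest"

-- ===== PORT B =====
-- single pass: return a date on sight, remember the first version candidate
def evAltLoop : List String → Option String → String
  | [], cand => cand.getD "latest"
  | p :: rest, cand =>
    if evIsDate p then evFmtDate p
    else if cand.isNone && evIsVer p then evAltLoop rest (some p)
    else evAltLoop rest cand

def extract_version_py_alt (model_id : String) : String :=
  if model_id = "" then "unknown"
  else evAltLoop ((PySem.Str.split? model_id "-").getD []) none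

-- ===== PRECONDITION & SPEC =====
def Spec_extract_version_py (model_id : String) (out : String) : Prop := out = extract_version_py_alt model_id
instance (model_id : String) (out : String) : Decidable (Spec_extract_version_py model_id out) := by unfold Spec_extract_version_py; infer_instance

-- ===== CLAIM (what is proved, stated in full; the proofs are below) =====
def Claim_equal_extract_version_py : Prop := ∀ (model_id : String), Dom_extract_version_py model_id → Spec_extract_version_py model_id (extract_version_py model_id)

-- ===== LEMMAS AND PROOFS =====
-- B's loop computes A's two-scan result, for any carried candidate
theorem evAltLoop_eq (parts : List String) (cand : Option String) :
    evAltLoop parts cand =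
      match evDateFind parts with
      | some r => r
      | none =>
        match cand with
        | some c => c
        | none =>
          match evVerFind parts with
          | some r => r
          | none => "latest" := by
  induction parts generalizing cand with
  | nil => cases cand <;> simp [evAltLoop, evDateFind, evVerFind]
  | cons p rest ih =>
    by_cases hd : evIsDate p
    · simp [evAltLoop, evDateFind, hd]
    · by_cases hv : evIsVer p
      · cases cand with
        | none => simp [evAltLoop, evDateFind, evVerFind, hd, hv, ih]
        | some c => simp [evAltLoop, evDateFind, hd, hv, ih]
      · cases cand <;> simp [evAltLoop, evDateFind, evVerFind, hd, hv, ih]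

-- ===== VERDICT (by name: the statement is the Claim_ definition above) =====
theorem extract_version_py_spec : Claim_equal_extract_version_py := by
  intro model_id _
  unfold Spec_extract_version_py extract_version_py extract_version_py_alt
  by_cases h : model_id = ""
  · simp [h]
  · simp only [h, if_false, evAltLoop_eq]
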